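-- pv_equiv track=rewrite | github.com/kgt1220/Hippocampus_SNN | module/Tools/tools.py | filter_SP
-- ===== SOURCE A (Python) =====
-- def filter_SP(OverI, OverO, Pair_idx, DGlen_idx_excluded):
--     Pair_idx_excluded = []
--     # 제거해야할 인풋(engram 부적절) 중에
--     for i, comp in enumerate(DGlen_idx_excluded):
--         # 오버랩 계산된 애들 중 이 부적절 인풋이 들어가면 일단 모아놓음
--         for j, comp2 in enumerate(Pair_idx):
--             if comp in comp2:
--                 Pair_idx_excluded.append(comp2)
--
--     OverI_v2 = []
--     OverO_v2 = []
--     Pair_idx_v2 = []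
--
--     # target SP 중에서 부적절 engram과 계산된 건 제거
--     for k, comp3 in enumerate(Pair_idx):
--         if comp3 not in Pair_idx_excluded:
--             OverI_v2.append(OverI[k])
--             OverO_v2.append(OverO[k])
--             Pair_idx_v2.append(comp3)
--     return OverI_v2, OverO_v2, Pair_idx_v2
-- ===== SOURCE B (Python) =====
-- def filter_SP(OverI, OverO, Pair_idx, DGlen_idx_excluded):
--     OverI_v2 = []
--     OverO_v2 = []
--     Pair_idx_v2 = []
--     for k, pair in enumerate(Pair_idx):
--         if not any(comp in pair for comp in DGlen_idx_excluded):
--             OverI_v2.append(OverI[k])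
--             OverO_v2.append(OverO[k])
--             Pair_idx_v2.append(pair)
--     return OverI_v2, OverO_v2, Pair_idx_v2
-- ===== Notes on version B (the rewrite author's own statement) =====
-- stated objective: faster
-- what changed: B fuses A's two phases (build the list of all pairs containing an excluded index, then filter Pair_idx by whole-pair list membership in that table) into one direct pass that tests each pair for an excluded element, eliminating the intermediate Pair_idx_excluded table and its O(n*d)-long membership scans per pair.
import Mathlib
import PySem

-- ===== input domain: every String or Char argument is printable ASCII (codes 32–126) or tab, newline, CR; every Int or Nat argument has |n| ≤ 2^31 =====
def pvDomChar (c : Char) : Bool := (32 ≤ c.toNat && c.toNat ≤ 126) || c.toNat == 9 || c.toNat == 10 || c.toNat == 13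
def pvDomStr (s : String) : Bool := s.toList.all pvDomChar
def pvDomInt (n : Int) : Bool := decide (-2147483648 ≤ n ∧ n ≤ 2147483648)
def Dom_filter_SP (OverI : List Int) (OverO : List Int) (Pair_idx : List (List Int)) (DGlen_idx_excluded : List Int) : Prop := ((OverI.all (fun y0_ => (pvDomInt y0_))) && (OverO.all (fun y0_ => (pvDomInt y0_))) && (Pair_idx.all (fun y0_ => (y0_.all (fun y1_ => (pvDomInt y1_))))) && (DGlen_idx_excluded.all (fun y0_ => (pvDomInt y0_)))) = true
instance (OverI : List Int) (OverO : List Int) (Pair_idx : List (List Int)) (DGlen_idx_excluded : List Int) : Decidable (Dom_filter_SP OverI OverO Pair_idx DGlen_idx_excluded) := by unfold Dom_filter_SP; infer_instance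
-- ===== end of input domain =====

-- B fuses A's build-table-then-filter into one direct pass testing each pair for an excluded element (objective: simpler).

-- ===== PORT A =====
-- OverI[k]/OverO[k]: k is the enumerate index, nonnegative; Pre_ guarantees it is in range
-- whenever the branch is taken (Python raises IndexError there otherwise), so pyGetD's default is never used inside Pre_.
def filter_SP (OverI : List Int) (OverO : List Int) (Pair_idx : List (List Int)) (DGlen_idx_excluded : List Int) : List Int × List Int × List (List Int) :=
  let Pair_idx_excluded : List (List Int) :=
    DGlen_idx_excluded.foldl (fun acc comp =>
      Pair_idx.foldl (fun acc2 comp2 => if comp ∈ comp2 then acc2 ++ [comp2] else acc2) acc) []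
  let st :=
    (PySem.List.enumerate Pair_idx).foldl
      (fun (st : List Int × List Int × List (List Int)) kc =>
        if kc.2 ∉ Pair_idx_excluded then
          (st.1 ++ [PySem.List.pyGetD OverI kc.1 0],
           st.2.1 ++ [PySem.List.pyGetD OverO kc.1 0],
           st.2.2 ++ [kc.2])
        else st)
      ([], [], [])
  st

-- ===== PORT B =====
-- B's single loop over enumerate(Pair_idx), as structural recursion carrying the index k.
def filterSPGo (OverI : List Int) (OverO : List Int) (DGlen_idx_excluded : List Int) : Int → List (List Int) → List Int × List Int × List (List Int)
  | _, [] => ([], [], [])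
  | k, p :: rest =>
    let r := filterSPGo OverI OverO DGlen_idx_excluded (k + 1) rest
    if DGlen_idx_excluded.any (fun comp => decide (comp ∈ p)) then r
    else (PySem.List.pyGetD OverI k 0 :: r.1, PySem.List.pyGetD OverO k 0 :: r.2.1, p :: r.2.2)

def filter_SP_alt (OverI : List Int) (OverO : List Int) (Pair_idx : List (List Int)) (DGlen_idx_excluded : List Int) : List Int × List Int × List (List Int) :=
  filterSPGo OverI OverO DGlen_idx_excluded 0 Pair_idx

-- ===== PRECONDITION & SPEC =====
-- Pre_ excludes exactly the inputs where Python A raises IndexError: a kept pair (one containing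
-- no excluded index) at position k with OverI or OverO shorter than k+1.
def Pre_filter_SP (OverI : List Int) (OverO : List Int) (Pair_idx : List (List Int)) (DGlen_idx_excluded : List Int) : Prop :=
  ∀ k, k < Pair_idx.length → (¬ ∃ c ∈ DGlen_idx_excluded, c ∈ Pair_idx.getD k []) →
    k < OverI.length ∧ k < OverO.length
instance (OverI : List Int) (OverO : List Int) (Pair_idx : List (List Int)) (DGlen_idx_excluded : List Int) : Decidable (Pre_filter_SP OverI OverO Pair_idx DGlen_idx_excluded) := by unfold Pre_filter_SP; infer_instance

def pvWitness_filter_SP : List Int × List Int × List (List Int) × List Int := ([5, 6], [7, 8], [[0, 2], [1, 3]], [1])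

def Spec_filter_SP (OverI : List Int) (OverO : List Int) (Pair_idx : List (List Int)) (DGlen_idx_excluded : List Int) (out : List Int × List Int × List (List Int)) : Prop := out = filter_SP_alt OverI OverO Pair_idx DGlen_idx_excluded
instance (OverI : List Int) (OverO : List Int) (Pair_idx : List (List Int)) (DGlen_idx_excluded : List Int) (out : List Int × List Int × List (List Int)) : Decidable (Spec_filter_SP OverI OverO Pair_idx DGlen_idx_excluded out) := by unfold Spec_filter_SP; infer_instance

-- ===== CLAIM (what is proved, stated in full; the proofs are below) =====
def Claim_equal_filter_SP : Prop := ∀ (OverI : List Int) (OverO : List Int) (Pair_idx : List (List Int)) (DGlen_idx_excluded : List Int), Dom_filter_SP OverI OverO Pair_idx DGlen_idx_excluded → Pre_filter_SP OverI OverO Pair_idx DGlen_idx_excluded → Spec_filter_SP OverI OverO Pair_idx DGlen_idx_excluded (filter_SP OverI OverO Pair_idx DGlen_idx_excluded)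

-- ===== LEMMAS AND PROOFS =====

-- Membership in A's Pair_idx_excluded table: exactly the pairs of Pair_idx containing some excluded index.
lemma mem_excl_iff (Pair_idx : List (List Int)) (DG : List Int) (x : List Int) :
    x ∈ DG.foldl (fun acc comp =>
        Pair_idx.foldl (fun acc2 comp2 => if comp ∈ comp2 then acc2 ++ [comp2] else acc2) acc) []
      ↔ ∃ c ∈ DG, c ∈ x ∧ x ∈ Pair_idx := by
  have hinner : ∀ (comp : Int) (acc : List (List Int)),
      Pair_idx.foldl (fun acc2 comp2 => if comp ∈ comp2 then acc2 ++ [comp2] else acc2) acc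
        = acc ++ (Pair_idx.filter (fun comp2 => decide (comp ∈ comp2))).map id := by
    intro comp acc
    calc Pair_idx.foldl (fun acc2 comp2 => if comp ∈ comp2 then acc2 ++ [comp2] else acc2) acc
        = Pair_idx.foldl (fun acc2 comp2 => if (fun c2 => decide (comp ∈ c2)) comp2 = true then acc2 ++ [id comp2] else acc2) acc := by
          apply PySem.List.foldl_congr_mem
          intro a y _
          simp
      _ = acc ++ (Pair_idx.filter (fun comp2 => decide (comp ∈ comp2))).map id :=
          PySem.List.foldl_append_if _ id Pair_idx acc
  have h : DG.foldl (fun acc comp =>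
        Pair_idx.foldl (fun acc2 comp2 => if comp ∈ comp2 then acc2 ++ [comp2] else acc2) acc) []
      = DG.flatMap (fun comp => (Pair_idx.filter (fun comp2 => decide (comp ∈ comp2))).map id) := by
    calc DG.foldl (fun acc comp =>
            Pair_idx.foldl (fun acc2 comp2 => if comp ∈ comp2 then acc2 ++ [comp2] else acc2) acc) []
        = DG.foldl (fun acc comp => acc ++ (Pair_idx.filter (fun comp2 => decide (comp ∈ comp2))).map id) [] :=
          PySem.List.foldl_congr_mem DG _ _ [] (fun acc comp _ => hinner comp acc)
      _ = [] ++ DG.flatMap (fun comp => (Pair_idx.filter (fun comp2 => decide (comp ∈ comp2))).map id) :=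
          PySem.List.foldl_append_eq_flatMap _ DG []
      _ = DG.flatMap (fun comp => (Pair_idx.filter (fun comp2 => decide (comp ∈ comp2))).map id) := by simp
  rw [h]
  simp [List.mem_flatMap, List.mem_filter]
  tauto

-- A's output loop equals B's recursion, for any start index and accumulator, given that the
-- table-membership test agrees with the direct any-test on every element of the traversed suffix.
lemma loop_eq (OverI OverO DG : List Int) (excl : List (List Int)) (P : List (List Int))
    (h : ∀ p ∈ P, (p ∈ excl ↔ ∃ c ∈ DG, c ∈ p)) :
    ∀ (s : Int) (acc : List Int × List Int × List (List Int)),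
    (PySem.List.enumerate P s).foldl
      (fun (st : List Int × List Int × List (List Int)) kc =>
        if kc.2 ∉ excl then
          (st.1 ++ [PySem.List.pyGetD OverI kc.1 0],
           st.2.1 ++ [PySem.List.pyGetD OverO kc.1 0],
           st.2.2 ++ [kc.2])
        else st) acc
      = (acc.1 ++ (filterSPGo OverI OverO DG s P).1,
         acc.2.1 ++ (filterSPGo OverI OverO DG s P).2.1,
         acc.2.2 ++ (filterSPGo OverI OverO DG s P).2.2) := by
  induction P with
  | nil => intro s acc; simp [PySem.List.enumerate, filterSPGo]
  | cons p rest ih =>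
    intro s acc
    have hp := h p (by simp)
    have hrest : ∀ q ∈ rest, (q ∈ excl ↔ ∃ c ∈ DG, c ∈ q) := fun q hq => h q (by simp [hq])
    have hany : (DG.any (fun comp => decide (comp ∈ p)) = true) ↔ ∃ c ∈ DG, c ∈ p := by
      simp [List.any_eq_true]
    have hstep : PySem.List.enumerate (p :: rest) s = (s, p) :: PySem.List.enumerate rest (s + 1) := rfl
    by_cases hc : ∃ c ∈ DG, c ∈ p
    · have hb : DG.any (fun comp => decide (comp ∈ p)) = true := hany.mpr hc
      have hmem : p ∈ excl := hp.mpr hc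
      simp only [hstep, List.foldl_cons, filterSPGo, hb, if_true]
      rw [if_neg (by simp [hmem])]
      exact ih hrest (s + 1) acc
    · have hmem : p ∉ excl := fun hx => hc (hp.mp hx)
      have hb : DG.any (fun comp => decide (comp ∈ p)) = false := by
        by_contra hne
        exact hc (hany.mp (by revert hne; cases DG.any (fun comp => decide (comp ∈ p)) <;> simp))
      simp only [hstep, List.foldl_cons, filterSPGo, hb, Bool.false_eq_true, if_false]
      rw [if_pos hmem, ih hrest (s + 1)]
      simp

-- ===== VERDICT (by name: the statement is the Claim_ definition above) =====
theorem filter_SP_spec : Claim_equal_filter_SP := by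
  intro OverI OverO Pair_idx DG _ _
  simp only [Spec_filter_SP, filter_SP, filter_SP_alt]
  rw [loop_eq OverI OverO DG _ Pair_idx
    (fun p hp => by rw [mem_excl_iff]; constructor
                    · rintro ⟨c, hc, hcp, _⟩; exact ⟨c, hc, hcp⟩
                    · rintro ⟨c, hc, hcp⟩; exact ⟨c, hc, hcp, hp⟩) 0 ([], [], [])]
  simp
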